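-- pv_equiv track=rewrite | github.com/AThomas102/RF-Amplifier-Power-Freq-Sweep-GUI | analysis_module.py | time_function
-- ===== SOURCE A (Python) =====
-- def time_function(time_col, indices):
--
--     if len(indices[0]) > 1:
--         soak_times = []
--         for i in range(len(time_col)):
--             cycle_durations = []
--             end = []
--
--             device_time = time_col[i]
--             device_indices = indices[i]
--             for j in range(len(device_indices)-1):
--                 index1 = device_indices[j]
--                 index2 = device_indices[j+1] - 1
--                 cycle_start = device_time[index1]
--                 cycle_end = device_time[index2]
--                 end.append(cycle_end)
--
--                 cycle_duration = cycle_end - cycle_start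
--                 cycle_durations.append(cycle_duration)
--
--             cumulative_durations = []
--             cumulative_durations.append(cycle_durations[0])
--             for i in range(1,len(cycle_durations)):
--                 cumulative_duration =  cycle_durations[i] + cumulative_durations[i-1]
--                 cumulative_durations.append(cumulative_duration)
--
--             device_soak_times = []
--             for i in range(len(cumulative_durations)):
--                 soak_time = end[i] - cumulative_durations[i]
--                 device_soak_times.append(soak_time)
--
--             soak_times.append(device_soak_times)
--     else:
--         soak_times = [[0] for i in indices]
--
--     return soak_times
-- ===== SOURCE B (Python) =====
-- def time_function(time_col, indices):
--     if len(indices[0]) > 1: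
--         soak_times = []
--         for device_time, device_indices in zip(time_col, indices):
--             device_soak = []
--             cumulative = 0
--             for j in range(len(device_indices) - 1):
--                 cycle_start = device_time[device_indices[j]]
--                 cycle_end = device_time[device_indices[j + 1] - 1]
--                 cumulative += cycle_end - cycle_start
--                 device_soak.append(cycle_end - cumulative)
--             soak_times.append(device_soak)
--         return soak_times
--     return [[0] for _ in indices]
-- ===== Notes on version B (the rewrite author's own statement) =====
-- stated objective: simpler
-- what changed: Replaces A's three per-device passes (build durations+ends, build a cumulative-duration list with indexed lookups, subtract elementwise) by a single loop over consecutive index pairs carrying one running cumulative accumulator, and zips time_col with indices instead of indexing.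
import Mathlib
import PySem

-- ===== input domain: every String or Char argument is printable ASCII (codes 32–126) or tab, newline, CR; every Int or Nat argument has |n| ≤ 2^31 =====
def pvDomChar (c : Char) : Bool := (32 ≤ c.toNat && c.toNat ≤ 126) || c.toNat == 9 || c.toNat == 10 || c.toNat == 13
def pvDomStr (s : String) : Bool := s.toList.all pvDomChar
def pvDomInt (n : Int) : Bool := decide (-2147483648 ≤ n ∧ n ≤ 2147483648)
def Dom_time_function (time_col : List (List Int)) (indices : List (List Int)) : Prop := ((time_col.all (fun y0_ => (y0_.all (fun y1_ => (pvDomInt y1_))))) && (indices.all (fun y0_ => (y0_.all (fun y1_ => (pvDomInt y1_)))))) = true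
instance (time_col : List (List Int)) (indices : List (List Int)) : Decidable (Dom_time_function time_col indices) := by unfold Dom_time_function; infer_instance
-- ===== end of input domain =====

-- B collapses A's three per-device passes (durations, cumulative list, soak list) into one
-- loop with a running cumulative accumulator: simpler, same integer results.

-- ===== PORT A =====
-- per-device body of A's outer loop: pass 1 (durations + ends), pass 2 (cumulative list), pass 3 (soak)
def tfA_device (device_time : List Int) (device_indices : List Int) : List Int :=
  let de : List Int × List Int :=
    (PySem.List.pyRange 0 ((device_indices.length : Int) - 1) 1).foldl
      (fun st j =>
        let index1 := PySem.List.pyGetD device_indices j 0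
        let index2 := PySem.List.pyGetD device_indices (j + 1) 0 - 1
        let cycle_start := PySem.List.pyGetD device_time index1 0
        let cycle_end := PySem.List.pyGetD device_time index2 0
        (st.1 ++ [cycle_end - cycle_start], st.2 ++ [cycle_end]))
      ([], [])
  let cycle_durations := de.1
  let ends := de.2
  let cumulative_durations :=
    (PySem.List.pyRange 1 (cycle_durations.length : Int) 1).foldl
      (fun acc i => acc ++ [PySem.List.pyGetD cycle_durations i 0 + PySem.List.pyGetD acc (i - 1) 0])
      [PySem.List.pyGetD cycle_durations 0 0]
  (PySem.List.pyRange 0 (cumulative_durations.length : Int) 1).foldl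
    (fun acc i => acc ++ [PySem.List.pyGetD ends i 0 - PySem.List.pyGetD cumulative_durations i 0]) []

def time_function (time_col : List (List Int)) (indices : List (List Int)) : List (List Int) :=
  if (1 : Int) < ((indices.headD []).length : Int) then
    (PySem.List.pyRange 0 (time_col.length : Int) 1).foldl
      (fun soak i =>
        soak ++ [tfA_device (PySem.List.pyGetD time_col i []) (PySem.List.pyGetD indices i [])]) []
  else
    indices.map (fun _ => [0])

-- ===== PORT B =====
-- per-device body of B's zip loop: one pass with a running cumulative accumulator
def tfB_device (device_time : List Int) (device_indices : List Int) : List Int :=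
  ((PySem.List.pyRange 0 ((device_indices.length : Int) - 1) 1).foldl
    (fun (st : List Int × Int) j =>
      let cycle_start := PySem.List.pyGetD device_time (PySem.List.pyGetD device_indices j 0) 0
      let cycle_end := PySem.List.pyGetD device_time (PySem.List.pyGetD device_indices (j + 1) 0 - 1) 0
      let cumulative := st.2 + (cycle_end - cycle_start)
      (st.1 ++ [cycle_end - cumulative], cumulative))
    ([], 0)).1

def time_function_alt (time_col : List (List Int)) (indices : List (List Int)) : List (List Int) :=
  if (1 : Int) < ((indices.headD []).length : Int) then
    (time_col.zip indices).foldl (fun soak p => soak ++ [tfB_device p.1 p.2]) []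
  else
    indices.map (fun _ => [0])

-- ===== PRECONDITION & SPEC =====
-- Pre_ excludes exactly the inputs where Python A raises: empty indices (indices[0] raises
-- IndexError), indices shorter than time_col, a device with fewer than 2 indices (then
-- cycle_durations[0] raises), and out-of-range list indices.
def Pre_time_function (time_col : List (List Int)) (indices : List (List Int)) : Prop :=
  indices ≠ [] ∧
  (1 < (indices.headD []).length →
    time_col.length ≤ indices.length ∧
    ∀ i < time_col.length,
      2 ≤ (indices.getD i []).length ∧
      ∀ j < (indices.getD i []).length - 1,
        PySem.Raise.InRange (time_col.getD i []).length ((indices.getD i []).getD j 0) ∧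
        PySem.Raise.InRange (time_col.getD i []).length ((indices.getD i []).getD (j + 1) 0 - 1))
instance (time_col : List (List Int)) (indices : List (List Int)) : Decidable (Pre_time_function time_col indices) := by unfold Pre_time_function; infer_instance

def pvWitness_time_function : List (List Int) × List (List Int) := ([[1, 2, 5]], [[0, 2]])

def Spec_time_function (time_col : List (List Int)) (indices : List (List Int)) (out : List (List Int)) : Prop := out = time_function_alt time_col indices
instance (time_col : List (List Int)) (indices : List (List Int)) (out : List (List Int)) : Decidable (Spec_time_function time_col indices out) := by unfold Spec_time_function; infer_instance

-- ===== CLAIM (what is proved, stated in full; the proofs are below) =====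
def Claim_equal_time_function : Prop := ∀ (time_col : List (List Int)) (indices : List (List Int)), Dom_time_function time_col indices → Pre_time_function time_col indices → Spec_time_function time_col indices (time_function time_col indices)

-- ===== LEMMAS AND PROOFS =====

-- abbreviations for the cycle start / end both device bodies read at step j
def pvS (dt di : List Int) (j : Int) : Int := PySem.List.pyGetD dt (PySem.List.pyGetD di j 0) 0
def pvT (dt di : List Int) (j : Int) : Int := PySem.List.pyGetD dt (PySem.List.pyGetD di (j + 1) 0 - 1) 0
-- sum of the first m cycle durations
def pvQ (dt di : List Int) (m : ℕ) : Int := ((List.range m).map (fun k : ℕ => pvT dt di k - pvS dt di k)).sum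

lemma pvQ_succ (dt di : List Int) (m : ℕ) :
    pvQ dt di (m + 1) = pvQ dt di m + (pvT dt di m - pvS dt di m) := by
  simp [pvQ, List.range_succ]

-- indexing a comprehension over range
lemma pvGetD_map_range {f : ℕ → Int} (M k : ℕ) (h : k < M) :
    PySem.List.pyGetD ((List.range M).map f) (k : Int) 0 = f k := by
  simp only [PySem.List.pyGetD_natCast]
  rw [List.getD_eq_getElem?_getD, List.getElem?_map, List.getElem?_range h]
  rfl

-- B's one-pass fold, closed form
lemma tfB_fold (dt di : List Int) (m : ℕ) :
    (PySem.List.pyRange 0 (m : Int) 1).foldl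
      (fun (st : List Int × Int) j =>
        (st.1 ++ [PySem.List.pyGetD dt (PySem.List.pyGetD di (j + 1) 0 - 1) 0 -
          (st.2 + (PySem.List.pyGetD dt (PySem.List.pyGetD di (j + 1) 0 - 1) 0 -
            PySem.List.pyGetD dt (PySem.List.pyGetD di j 0) 0))],
         st.2 + (PySem.List.pyGetD dt (PySem.List.pyGetD di (j + 1) 0 - 1) 0 -
            PySem.List.pyGetD dt (PySem.List.pyGetD di j 0) 0)))
      ([], 0)
    = ((List.range m).map (fun k : ℕ => pvT dt di k - pvQ dt di (k + 1)), pvQ dt di m) := by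
  induction m with
  | zero => simp [pvQ]
  | succ n ih =>
      rw [show ((n + 1 : ℕ) : Int) = (n : Int) + 1 by push_cast; ring,
        PySem.List.pyRange_one_succ_right (by positivity)]
      rw [List.foldl_append, ih]
      simp only [List.foldl_cons, List.foldl_nil, List.range_succ, List.map_append, List.map_cons, List.map_nil]
      have hT : PySem.List.pyGetD dt (PySem.List.pyGetD di ((n : Int) + 1) 0 - 1) 0 = pvT dt di (n : Int) := rfl
      have hS : PySem.List.pyGetD dt (PySem.List.pyGetD di ((n : Int)) 0) 0 = pvS dt di (n : Int) := rfl
      rw [hT, hS, pvQ_succ]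

-- A's pass 1 (durations and ends), closed form
lemma tfA_pass1 (dt di : List Int) (m : ℕ) :
    (PySem.List.pyRange 0 (m : Int) 1).foldl
      (fun (st : List Int × List Int) j =>
        (st.1 ++ [PySem.List.pyGetD dt (PySem.List.pyGetD di (j + 1) 0 - 1) 0 -
          PySem.List.pyGetD dt (PySem.List.pyGetD di j 0) 0],
         st.2 ++ [PySem.List.pyGetD dt (PySem.List.pyGetD di (j + 1) 0 - 1) 0]))
      ([], [])
    = ((List.range m).map (fun k : ℕ => pvT dt di k - pvS dt di k), (List.range m).map (fun k : ℕ => pvT dt di k)) := by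
  induction m with
  | zero => simp
  | succ n ih =>
      rw [show ((n + 1 : ℕ) : Int) = (n : Int) + 1 by push_cast; ring,
        PySem.List.pyRange_one_succ_right (by positivity)]
      rw [List.foldl_append, ih]
      simp [List.range_succ, pvT, pvS]

-- A's pass 2 (cumulative durations), closed form; M is the fixed length of cycle_durations
lemma tfA_pass2 (dt di : List Int) (M : ℕ) (m : ℕ) (h1 : 1 ≤ m) (h2 : m ≤ M) :
    (PySem.List.pyRange 1 (m : Int) 1).foldl
      (fun acc i => acc ++ [PySem.List.pyGetD ((List.range M).map (fun k : ℕ => pvT dt di k - pvS dt di k)) i 0 +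
        PySem.List.pyGetD acc (i - 1) 0])
      [PySem.List.pyGetD ((List.range M).map (fun k : ℕ => pvT dt di k - pvS dt di k)) 0 0]
    = (List.range m).map (fun k : ℕ => pvQ dt di (k + 1)) := by
  induction m with
  | zero => omega
  | succ n ih =>
      by_cases hn : n = 0
      · subst hn
        rw [PySem.List.pyRange_one_eq_nil (by norm_num)]
        have h0 : (0 : ℕ) < M := by omega
        have e0 := pvGetD_map_range (f := fun k : ℕ => pvT dt di k - pvS dt di k) M 0 h0
        simp only [Nat.cast_zero] at e0
        simp only [List.foldl_nil, e0]
        simp [pvQ]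
      · have hn1 : 1 ≤ n := by omega
        rw [show ((n + 1 : ℕ) : Int) = (n : Int) + 1 by push_cast; ring,
          PySem.List.pyRange_one_succ_right (by exact_mod_cast hn1)]
        rw [List.foldl_append, ih hn1 (by omega)]
        simp only [List.foldl_cons, List.foldl_nil, List.range_succ, List.map_append, List.map_cons, List.map_nil]
        congr 1
        have hnM : n < M := by omega
        have e1 := pvGetD_map_range (f := fun k : ℕ => pvT dt di k - pvS dt di k) M n hnM
        have e2 : PySem.List.pyGetD ((List.range n).map (fun k : ℕ => pvQ dt di (k + 1))) ((n : Int) - 1) 0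
            = pvQ dt di n := by
          rw [show ((n : Int) - 1) = ((n - 1 : ℕ) : Int) by omega]
          rw [pvGetD_map_range (f := fun k : ℕ => pvQ dt di (k + 1)) n (n - 1) (by omega)]
          rw [show n - 1 + 1 = n by omega]
        rw [e1, e2, pvQ_succ]
        ring_nf

-- generic: appending g i over range 0..m builds the map
lemma foldl_append_pyRange {α : Type} (g : Int → α) (m : ℕ) :
    (PySem.List.pyRange 0 (m : Int) 1).foldl (fun acc i => acc ++ [g i]) ([] : List α)
    = (List.range m).map (fun k : ℕ => g (k : Int)) := by
  rw [PySem.List.foldl_append_singleton_eq_map, PySem.List.pyRange_one]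
  simp

-- the two device bodies agree on any device with at least two indices
lemma device_eq (dt di : List Int) (h : 2 ≤ di.length) :
    tfA_device dt di = tfB_device dt di := by
  have hm : ((di.length : Int) - 1) = ((di.length - 1 : ℕ) : Int) := by omega
  set m : ℕ := di.length - 1 with hmdef
  have hm1 : 1 ≤ m := by omega
  unfold tfA_device tfB_device
  rw [hm]
  simp only []
  rw [tfA_pass1 dt di m, tfB_fold dt di m]
  have hlen : ((List.range m).map (fun k : ℕ => pvT dt di k - pvS dt di k)).length = m := by simp
  rw [hlen]
  rw [tfA_pass2 dt di m m hm1 (le_refl m)]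
  have hlen2 : ((List.range m).map (fun k : ℕ => pvQ dt di (k + 1))).length = m := by simp
  rw [hlen2, foldl_append_pyRange]
  apply List.ext_getElem
  · simp
  · intro k hk1 hk2
    simp only [List.getElem_map, List.getElem_range] at *
    have hkm : k < m := by simpa using hk1
    have eE := pvGetD_map_range (f := fun j : ℕ => pvT dt di j) m k hkm
    have eC := pvGetD_map_range (f := fun j : ℕ => pvQ dt di (j + 1)) m k hkm
    simp [eE, eC]

-- ===== VERDICT (by name: the statement is the Claim_ definition above) =====
theorem time_function_spec : Claim_equal_time_function := by
  intro time_col indices _ hpre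
  unfold Spec_time_function
  unfold time_function time_function_alt
  by_cases hb : (1 : Int) < ((indices.headD []).length : Int)
  · rw [if_pos hb, if_pos hb]
    obtain ⟨-, hthen⟩ := hpre
    obtain ⟨hlen, hdev⟩ := hthen (by exact_mod_cast hb)
    rw [foldl_append_pyRange (fun i => tfA_device (PySem.List.pyGetD time_col i []) (PySem.List.pyGetD indices i [])) time_col.length,
      PySem.List.foldl_append_singleton_eq_map]
    simp only [List.nil_append]
    apply List.ext_getElem
    · simp [List.length_zip]; omega
    · intro k hk1 hk2
      have hkt : k < time_col.length := by simpa using hk1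
      obtain ⟨h2, -⟩ := hdev k hkt
      simp only [List.getElem_map, List.getElem_range, List.getElem_zip]
      have e1 : PySem.List.pyGetD time_col (k : Int) [] = time_col[k] := by
        simp [List.getD_eq_getElem?_getD, List.getElem?_eq_getElem hkt]
      have hki : k < indices.length := by omega
      have e2 : PySem.List.pyGetD indices (k : Int) [] = indices[k] := by
        simp [List.getD_eq_getElem?_getD, List.getElem?_eq_getElem hki]
      rw [e1, e2]
      apply device_eq
      have : indices.getD k [] = indices[k] := List.getD_eq_getElem _ _ hki
      rw [← this]; exact h2
  · rw [if_neg hb, if_neg hb]
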